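-- pv_equiv track=rewrite | github.com/GabrielUlisses/Python-documents | sincronismo e assíncronismo/procedimento sincrono.py | consecutive_numbers_needed
-- ===== SOURCE A (Python) =====
-- def consecutive_numbers_needed(A):
--     A.sort()
--
--     numbers_to_add = []
--     for idx, a in enumerate(A):
--         if idx < len(A)-1 and A[idx+1] != a+1:
--             for x in range(a+1,A[idx+1]):
--                 numbers_to_add.append(x)
--
--     return numbers_to_add
-- ===== SOURCE B (Python) =====
-- def consecutive_numbers_needed(A):
--     A.sort()
--     if not A:
--         return []
--     present = set(A)
--     return [x for x in range(A[0], A[-1] + 1) if x not in present]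
-- ===== Notes on version B (the rewrite author's own statement) =====
-- stated objective: idiomatic
-- what changed: Instead of scanning consecutive sorted pairs and filling each gap with an inner range loop, B sorts, builds a set of the present values once, and emits one comprehension over the whole integer span filtered by set membership; the in-place sort side effect is kept.
import Mathlib
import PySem

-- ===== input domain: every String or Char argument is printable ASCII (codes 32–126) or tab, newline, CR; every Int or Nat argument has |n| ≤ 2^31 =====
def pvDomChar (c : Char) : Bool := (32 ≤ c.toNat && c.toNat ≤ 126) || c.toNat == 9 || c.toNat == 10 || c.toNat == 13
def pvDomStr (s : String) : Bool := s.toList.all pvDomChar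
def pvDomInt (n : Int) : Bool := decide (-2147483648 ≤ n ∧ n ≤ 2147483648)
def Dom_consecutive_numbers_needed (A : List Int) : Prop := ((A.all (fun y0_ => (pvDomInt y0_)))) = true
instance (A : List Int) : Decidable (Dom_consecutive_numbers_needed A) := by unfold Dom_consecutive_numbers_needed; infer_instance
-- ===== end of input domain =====

-- B replaces A's scan over consecutive sorted pairs (filling each gap with an inner loop) by one
-- membership-filtered comprehension over the whole span, using a set built once; same cost, more idiomatic.
-- A sorts its argument in place (a caller-visible mutation); B performs the same sort, and the
-- equivalence proved here is about the RETURN value.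

-- ===== PORT A =====
-- A.sort(); for idx, a in enumerate(A): if idx < len(A)-1 and A[idx+1] != a+1: inner range-append.
-- The 'none' branch of the lookup is unreachable: the guard idx < len(A)-1 keeps idx+1 in range.
def consecutive_numbers_needed (A : List Int) : List Int :=
  let S := PySem.List.sorted A (fun x => x)
  (PySem.List.enumerate S).foldl
    (fun acc p =>
      if p.1 < (S.length : Int) - 1 then
        match PySem.List.pyGet? S (p.1 + 1) with
        | some b => if b ≠ p.2 + 1 then acc ++ PySem.List.pyRange (p.2 + 1) b 1 else acc
        | none => acc
      else acc) []

-- ===== PORT B =====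
-- A.sort(); if not A: return []; present = set(A); [x for x in range(A[0], A[-1]+1) if x not in present]
def consecutive_numbers_needed_alt (A : List Int) : List Int :=
  let S := PySem.List.sorted A (fun x => x)
  if S = [] then []
  else
    let present := PySem.Set.ofList S
    match PySem.List.pyGet? S 0, PySem.List.pyGet? S (-1) with
    | some lo, some hi =>
        (PySem.List.pyRange lo (hi + 1) 1).filter (fun x => !(PySem.Set.contains present x))
    | _, _ => []   -- unreachable: S ≠ []

-- ===== PRECONDITION & SPEC =====
def Spec_consecutive_numbers_needed (A : List Int) (out : List Int) : Prop := out = consecutive_numbers_needed_alt A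
instance (A : List Int) (out : List Int) : Decidable (Spec_consecutive_numbers_needed A out) := by unfold Spec_consecutive_numbers_needed; infer_instance

-- ===== CLAIM (what is proved, stated in full; the proofs are below) =====
def Claim_equal_consecutive_numbers_needed : Prop := ∀ (A : List Int), Dom_consecutive_numbers_needed A → Spec_consecutive_numbers_needed A (consecutive_numbers_needed A)

-- ===== LEMMAS AND PROOFS =====

-- The adjacent-gap list of a sorted list: the structural shape of A's loop.
def pvGaps : List Int → List Int
  | a :: b :: t => PySem.List.pyRange (a + 1) b 1 ++ pvGaps (b :: t)
  | _ => []

-- A's enumerate loop body, flattened over the sorted list, is the adjacent-gap list.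
theorem pvEnumFlat_aux (pre S : List Int) :
    (PySem.List.enumerate S (pre.length : Int)).flatMap
      (fun p =>
        if p.1 < ((pre ++ S).length : Int) - 1 then
          match PySem.List.pyGet? (pre ++ S) (p.1 + 1) with
          | some b => if b ≠ p.2 + 1 then PySem.List.pyRange (p.2 + 1) b 1 else []
          | none => []
        else []) = pvGaps S := by
  induction S generalizing pre with
  | nil => simp [PySem.List.enumerate, pvGaps]
  | cons a rest ih =>
    rw [PySem.List.enumerate_cons]
    simp only [List.flatMap_cons]
    cases rest with
    | nil =>
      simp [pvGaps, PySem.List.enumerate]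
    | cons b t =>
      have hget : PySem.List.pyGet? (pre ++ a :: b :: t) ((pre.length : Int) + 1) = some b := by
        have hc : ((pre.length : Int) + 1) = ((pre.length + 1 : Nat) : Int) := by push_cast; ring
        rw [hc, PySem.List.pyGet?_natCast]
        rw [List.getElem?_append_right (by omega)]
        simp
      have hguard : (pre.length : Int) < ((pre ++ a :: b :: t).length : Int) - 1 := by
        simp; omega
      have hhead : (if (pre.length : Int) < ((pre ++ a :: b :: t).length : Int) - 1 then
          match PySem.List.pyGet? (pre ++ a :: b :: t) ((pre.length : Int) + 1) with
          | some c => if c ≠ a + 1 then PySem.List.pyRange (a + 1) c 1 else []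
          | none => []
        else []) = PySem.List.pyRange (a + 1) b 1 := by
        rw [if_pos hguard, hget]
        by_cases hb : b = a + 1
        · subst hb; simp [PySem.List.pyRange_one_eq_nil]
        · simp [hb]
      rw [hhead]
      have htail : (PySem.List.enumerate (b :: t) ((pre.length : Int) + 1)).flatMap
          (fun p =>
            if p.1 < ((pre ++ a :: b :: t).length : Int) - 1 then
              match PySem.List.pyGet? (pre ++ a :: b :: t) (p.1 + 1) with
              | some c => if c ≠ p.2 + 1 then PySem.List.pyRange (p.2 + 1) c 1 else []
              | none => []
            else []) = pvGaps (b :: t) := by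
        have hre : pre ++ a :: b :: t = (pre ++ [a]) ++ (b :: t) := by simp
        have hl : ((pre.length : Int) + 1) = ((pre ++ [a]).length : Int) := by simp
        rw [hre, hl]
        exact ih (pre ++ [a])
      rw [htail]
      rfl

-- pvGaps of a nonempty sorted list is the membership-filtered span.
theorem pvGaps_eq_filter (S : List Int) (hs : S.Pairwise (· ≤ ·)) (a : Int) (t : List Int)
    (hS : S = a :: t) :
    pvGaps S = (PySem.List.pyRange a (S.getLast (by simp [hS]) + 1) 1).filter
      (fun x => !(decide (x ∈ S))) := by
  induction t generalizing S a with
  | nil =>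
    subst hS
    simp [pvGaps, PySem.List.pyRange_one_singleton, List.filter]
  | cons b t ih =>
    subst hS
    have hab : a ≤ b := (List.pairwise_cons.mp hs).1 b (by simp)
    have hs' : (b :: t).Pairwise (· ≤ ·) := (List.pairwise_cons.mp hs).2
    have hIH := ih (b :: t) hs' b rfl
    have hlast : (a :: b :: t).getLast (by simp) = (b :: t).getLast (by simp) := by
      simp [List.getLast]
    set hi := (b :: t).getLast (by simp) with hhi
    have hmemge : ∀ x ∈ b :: t, b ≤ x := by
      intro x hx
      rcases List.mem_cons.mp hx with h | h
      · omega
      · exact (List.pairwise_cons.mp hs').1 _ h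
    have hbhi : b ≤ hi := hmemge _ (List.getLast_mem (by simp))
    rw [pvGaps, hlast, hIH]
    have h1 : PySem.List.pyRange a (hi + 1) 1 = a :: PySem.List.pyRange (a + 1) (hi + 1) 1 :=
      PySem.List.pyRange_one_cons (by omega)
    rw [h1]
    simp only [List.filter_cons]
    have ha_mem : (!(decide (a ∈ a :: b :: t))) = false := by simp
    rw [ha_mem]
    by_cases hlt : a + 1 ≤ b
    · have h2 : PySem.List.pyRange (a + 1) (hi + 1) 1 =
          PySem.List.pyRange (a + 1) b 1 ++ PySem.List.pyRange b (hi + 1) 1 :=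
        PySem.List.pyRange_one_append _ _ _ hlt (by omega)
      rw [h2, List.filter_append]
      congr 1
      · -- every x in (a+1 .. b-1) is missing from a :: b :: t
        symm
        rw [List.filter_eq_self]
        intro x hx
        have hxr := (PySem.List.mem_pyRange_one).mp hx
        have hnm : x ∉ a :: b :: t := by
          intro hxm
          rcases List.mem_cons.mp hxm with h | h
          · omega
          · have := hmemge x h; omega
        simp [hnm]
      · -- on (b .. hi), membership in a :: b :: t and in b :: t agree (x > a)
        apply List.filter_congr
        intro x hx
        have hxr := (PySem.List.mem_pyRange_one).mp hx
        have hiff : (x ∈ a :: b :: t) ↔ (x ∈ b :: t) := by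
          constructor
          · intro h; rcases List.mem_cons.mp h with h | h
            · omega
            · exact h
          · intro h; exact List.mem_cons.mpr (Or.inr h)
        simp [hiff]
    · -- a = b : the head gap is empty and a is filtered out on both sides
      have hab' : a = b := by omega
      subst hab'
      rw [PySem.List.pyRange_one_eq_nil (by omega)]
      have h3 : PySem.List.pyRange a (hi + 1) 1 = a :: PySem.List.pyRange (a + 1) (hi + 1) 1 :=
        PySem.List.pyRange_one_cons (by omega)
      rw [h3]
      simp only [List.filter_cons]
      have hmm : (!(decide (a ∈ a :: t))) = false := by simp
      rw [hmm, List.nil_append]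
      apply List.filter_congr
      intro x hx
      have hxr := (PySem.List.mem_pyRange_one).mp hx
      have hiff : (x ∈ a :: a :: t) ↔ (x ∈ a :: t) := by
        constructor
        · intro h; rcases List.mem_cons.mp h with h | h
          · omega
          · exact h
        · intro h; exact List.mem_cons.mpr (Or.inr h)
      simp [hiff]

-- ===== VERDICT (by name: the statement is the Claim_ definition above) =====
theorem consecutive_numbers_needed_spec : Claim_equal_consecutive_numbers_needed := by
  intro A _
  unfold Spec_consecutive_numbers_needed
  simp only [consecutive_numbers_needed, consecutive_numbers_needed_alt]
  generalize hSdef : PySem.List.sorted A (fun x => x) = S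
  have hsort : S.Pairwise (· ≤ ·) := by
    rw [← hSdef]; exact PySem.List.sorted_pairwise A (fun x => x)
  have hA : (PySem.List.enumerate S).foldl
      (fun acc p =>
        if p.1 < (S.length : Int) - 1 then
          match PySem.List.pyGet? S (p.1 + 1) with
          | some b => if b ≠ p.2 + 1 then acc ++ PySem.List.pyRange (p.2 + 1) b 1 else acc
          | none => acc
        else acc) [] = pvGaps S := by
    have hcongr : (PySem.List.enumerate S).foldl
        (fun acc p =>
          if p.1 < (S.length : Int) - 1 then
            match PySem.List.pyGet? S (p.1 + 1) with
            | some b => if b ≠ p.2 + 1 then acc ++ PySem.List.pyRange (p.2 + 1) b 1 else acc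
            | none => acc
          else acc) [] = (PySem.List.enumerate S).foldl
        (fun acc p => acc ++
          (if p.1 < (S.length : Int) - 1 then
            match PySem.List.pyGet? S (p.1 + 1) with
            | some b => if b ≠ p.2 + 1 then PySem.List.pyRange (p.2 + 1) b 1 else []
            | none => []
          else [])) [] := by
      apply PySem.List.foldl_congr_mem
      intro acc p _
      split_ifs with hcond
      · cases hg : PySem.List.pyGet? S (p.1 + 1) with
        | some b => by_cases hb : b = p.2 + 1 <;> simp [hb]
        | none => simp
      · simp
    rw [hcongr, PySem.List.foldl_append_eq_flatMap, List.nil_append]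
    have := pvEnumFlat_aux [] S
    simpa using this
  rw [hA]
  cases hcase : S with
  | nil => simp [pvGaps]
  | cons a t =>
    have hget0 : PySem.List.pyGet? (a :: t) 0 = some a := by
      rw [show (0 : Int) = ((0 : Nat) : Int) by rfl, PySem.List.pyGet?_natCast]
      rfl
    have hgetLast : PySem.List.pyGet? (a :: t) (-1) =
        some ((a :: t).getLast (by simp)) := by
      simp only [PySem.List.pyGet?, PySem.List.pyIdx?]
      have hl : (a :: t).length ≠ 0 := by simp
      rw [List.getLast_eq_getElem]
      simp
      omega
    rw [if_neg (show ¬(a :: t = []) by simp)]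
    simp only [hget0, hgetLast]
    have hfilt := pvGaps_eq_filter (a :: t) (hcase ▸ hsort) a t rfl
    rw [hfilt]
    apply List.filter_congr
    intro x _
    simp [pysem]
    by_cases hxa : x = a <;> simp [hxa]
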